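-- pv_equiv track=rewrite | github.com/zbrightUMKC/CS101L | Assignment_10/Source code/lab10.py | total_unique_words
-- ===== SOURCE A (Python) =====
-- def total_unique_words(clean_word_str):
--     '''Takes a string of words spereated by single spaces and returns the number of unique words in the string.'''
--     # Convert the string of words into a list of the words greater than length 3
--     word_list = clean_word_str.split(' ')
--     word_list3 = []
--     for i in word_list:
--         if len(i) > 3:
--             word_list3.append(i)
--     # Convert the list to a set to get the unique word count from it's length
--     word_set = set(word_list3)
--     total_unique = len(word_set)
--     return total_unique
-- ===== SOURCE B (Python) =====
-- def total_unique_words(clean_word_str):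
--     '''Count distinct words longer than 3 chars by sorting the filtered words
--     and scanning adjacent pairs (no hash set).'''
--     words = sorted(w for w in clean_word_str.split(' ') if len(w) > 3)
--     total = 0
--     prev = None
--     for w in words:
--         if prev != w:
--             total += 1
--             prev = w
--     return total
-- ===== Notes on version B (the rewrite author's own statement) =====
-- stated objective: alternative
-- what changed: Replaces the hash-set dedup with sort-then-adjacent-scan: the filtered words are sorted and distinct words are counted by comparing each word to its predecessor in one pass.
import Mathlib
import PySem

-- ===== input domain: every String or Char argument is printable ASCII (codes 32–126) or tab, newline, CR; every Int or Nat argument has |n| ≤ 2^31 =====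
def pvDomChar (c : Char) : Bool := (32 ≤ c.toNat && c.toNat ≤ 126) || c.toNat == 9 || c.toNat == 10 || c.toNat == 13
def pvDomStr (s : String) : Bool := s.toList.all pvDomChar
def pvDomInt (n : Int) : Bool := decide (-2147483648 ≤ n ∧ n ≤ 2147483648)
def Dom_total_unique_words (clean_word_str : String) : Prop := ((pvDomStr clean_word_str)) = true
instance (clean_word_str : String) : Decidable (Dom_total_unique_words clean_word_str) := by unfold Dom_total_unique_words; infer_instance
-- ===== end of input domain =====

-- B replaces A's hash-set dedup with sort-then-adjacent-scan (alternative decomposition, same results).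

-- ===== PORT A =====
def total_unique_words (clean_word_str : String) : Int :=
  let word_list := (PySem.Str.split? clean_word_str " ").getD []
  let word_list3 := word_list.foldl (fun acc i => if 3 < PySem.Str.len i then acc ++ [i] else acc) ([] : List String)
  let word_set : PySem.Set String := PySem.Set.ofList word_list3
  PySem.Set.len word_set

-- ===== PORT B =====
def total_unique_words_alt (clean_word_str : String) : Int :=
  let words := PySem.List.sorted
    (((PySem.Str.split? clean_word_str " ").getD []).filter (fun w => decide (3 < PySem.Str.len w)))
    (fun x => x) false
  let res := words.foldl
    (fun (st : Option String × Int) w => if st.1 = some w then st else (some w, st.2 + 1))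
    ((none : Option String), (0 : Int))
  res.2

-- ===== PRECONDITION & SPEC =====
def Spec_total_unique_words (clean_word_str : String) (out : Int) : Prop := out = total_unique_words_alt clean_word_str
instance (clean_word_str : String) (out : Int) : Decidable (Spec_total_unique_words clean_word_str out) := by unfold Spec_total_unique_words; infer_instance

-- ===== CLAIM (what is proved, stated in full; the proofs are below) =====
def Claim_equal_total_unique_words : Prop := ∀ (clean_word_str : String), Dom_total_unique_words clean_word_str → Spec_total_unique_words clean_word_str (total_unique_words clean_word_str)

-- ===== LEMMAS AND PROOFS =====

-- |set(y::ys)| counts y only when it is new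
theorem pv_ofList_cons_length {α : Type} [BEq α] [LawfulBEq α] (y : α) (ys : List α) :
    (PySem.Set.ofList (y :: ys)).length =
      if y ∈ ys then (PySem.Set.ofList ys).length else (PySem.Set.ofList ys).length + 1 := by
  rw [PySem.Set.ofList_cons]
  by_cases h : y ∈ ys
  · simp only [h, if_true, List.length_cons]
    have hperm : (y :: (PySem.Set.ofList ys).discard y).Perm (PySem.Set.ofList ys) := by
      rw [List.perm_ext_iff_of_nodup]
      · intro z
        simp only [List.mem_cons, PySem.Set.mem_discard, PySem.Set.mem_ofList]
        constructor
        · rintro (rfl | ⟨hz, _⟩) <;> simp_all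
        · intro hz
          by_cases hzy : z = y
          · exact Or.inl hzy
          · exact Or.inr ⟨hz, hzy⟩
      · exact List.Nodup.cons (by simp [PySem.Set.mem_discard])
          (PySem.Set.nodup_discard _ y (PySem.Set.nodup_ofList ys))
      · exact PySem.Set.nodup_ofList ys
    simpa using hperm.length_eq
  · simp only [h, if_false, List.length_cons]
    have hperm : ((PySem.Set.ofList ys).discard y).Perm (PySem.Set.ofList ys) := by
      rw [List.perm_ext_iff_of_nodup]
      · intro z
        simp only [PySem.Set.mem_discard, PySem.Set.mem_ofList]
        constructor
        · rintro ⟨hz, _⟩; exact hz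
        · intro hz
          refine ⟨hz, ?_⟩
          rintro rfl; exact h hz
      · exact PySem.Set.nodup_discard _ y (PySem.Set.nodup_ofList ys)
      · exact PySem.Set.nodup_ofList ys
    simp [hperm.length_eq]

-- the adjacency-scan step of B's loop
def pvStep (st : Option String × Int) (w : String) : Option String × Int :=
  if st.1 = some w then st else (some w, st.2 + 1)

theorem pv_adjAux (ys : List String) : ∀ (y : String) (c : Int),
    (y :: ys).Pairwise (· ≤ ·) →
    (ys.foldl pvStep (some y, c)).2 = c + ((PySem.Set.ofList (y :: ys)).length : Int) - 1 := by
  induction ys with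
  | nil =>
    intro y c _
    simp [pv_ofList_cons_length]
  | cons z ys ih =>
    intro y c hp
    have hyz : y ≤ z := (List.pairwise_cons.1 hp).1 z (by simp)
    have hzys : (z :: ys).Pairwise (· ≤ ·) := (List.pairwise_cons.1 hp).2
    by_cases hcase : y = z
    · subst hcase
      have hstep : pvStep (some y, c) y = (some y, c) := by simp [pvStep]
      rw [List.foldl_cons, hstep, ih y c hzys]
      have hmem : y ∈ (y :: ys) := by simp
      rw [pv_ofList_cons_length y (y :: ys)]
      simp [hmem]
    · have hstep : pvStep (some y, c) z = (some z, c + 1) := by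
        simp [pvStep, hcase]
      rw [List.foldl_cons, hstep, ih z (c + 1) hzys]
      have hnotmem : y ∉ (z :: ys) := by
        intro hmem
        rcases List.mem_cons.1 hmem with h | h
        · exact hcase h
        · have hzw : z ≤ y := (List.pairwise_cons.1 hzys).1 y h
          exact hcase (le_antisymm hyz hzw)
      rw [pv_ofList_cons_length y (z :: ys)]
      simp only [hnotmem, if_false]
      push_cast
      ring

-- for a sorted list B's scan returns |set(list)|
theorem pv_adjCount (ys : List String) (hp : ys.Pairwise (· ≤ ·)) :
    (ys.foldl pvStep ((none : Option String), (0 : Int))).2 =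
      ((PySem.Set.ofList ys).length : Int) := by
  cases ys with
  | nil => simp [PySem.Set.ofList]
  | cons y ys =>
    have hstep : pvStep ((none : Option String), (0 : Int)) y = (some y, 1) := by
      simp [pvStep]
    rw [List.foldl_cons, hstep, pv_adjAux ys y 1 hp]
    ring

-- |set(·)| only depends on the multiset of elements
theorem pv_ofList_length_perm {α : Type} [BEq α] [LawfulBEq α] {xs ys : List α}
    (h : xs.Perm ys) : (PySem.Set.ofList xs).length = (PySem.Set.ofList ys).length := by
  have hperm : (PySem.Set.ofList xs).Perm (PySem.Set.ofList ys) := by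
    rw [List.perm_ext_iff_of_nodup (PySem.Set.nodup_ofList xs) (PySem.Set.nodup_ofList ys)]
    intro z
    simp only [PySem.Set.mem_ofList]
    exact ⟨fun hz => h.mem_iff.1 hz, fun hz => h.mem_iff.2 hz⟩
  exact hperm.length_eq

-- the whole equality, for an arbitrary word list
theorem pv_main (wl : List String) :
    PySem.Set.len (PySem.Set.ofList
        (wl.foldl (fun acc i => if 3 < PySem.Str.len i then acc ++ [i] else acc) ([] : List String))) =
    (List.foldl (fun (st : Option String × Int) w => if st.1 = some w then st else (some w, st.2 + 1))
        ((none : Option String), (0 : Int))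
        (PySem.List.sorted (wl.filter (fun w => decide (3 < PySem.Str.len w))) (fun x => x) false)).2 := by
  have hloop : wl.foldl (fun acc i => if 3 < PySem.Str.len i then acc ++ [i] else acc)
      ([] : List String) = wl.filter (fun w => decide (3 < PySem.Str.len w)) := by
    have := PySem.List.foldl_append_if (fun w => decide (3 < PySem.Str.len w)) (fun w => w) wl
      ([] : List String)
    simpa using this
  rw [hloop]
  set L := wl.filter (fun w => decide (3 < PySem.Str.len w)) with hL
  have hsorted := PySem.List.sorted_pairwise L (fun x : String => x)
  have hperm := PySem.List.sorted_perm L (fun x : String => x) false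
  have hB : (List.foldl pvStep ((none : Option String), (0 : Int))
        (PySem.List.sorted L (fun x => x) false)).2 =
      ((PySem.Set.ofList (PySem.List.sorted L (fun x => x) false)).length : Int) :=
    pv_adjCount _ hsorted
  have hlen := pv_ofList_length_perm hperm
  show _ = (List.foldl pvStep ((none : Option String), (0 : Int))
      (PySem.List.sorted L (fun x => x) false)).2
  rw [hB, hlen]
  simp [PySem.Set.len]

-- ===== VERDICT (by name: the statement is the Claim_ definition above) =====
theorem total_unique_words_spec : Claim_equal_total_unique_words := by
  intro s _
  show total_unique_words s = total_unique_words_alt s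
  exact pv_main ((PySem.Str.split? s " ").getD [])
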